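-- pv_equiv track=rewrite | github.com/omarMohamedo-o/ai-booking-agent | src/web_scraper.py | _fallback_form_data
-- ===== SOURCE A (Python) =====
-- from typing import Dict, List, Optional, Tuple, Any
--
-- def _fallback_form_data(form_data: Dict[str, Any], user_info: Dict[str, str],
--                        ticket_count: int) -> Dict[str, str]:
--     """Generate form data without LLM assistance"""
--     data = {}
--
--     for field_name in form_data.keys():
--         field_lower = field_name.lower()
--
--         if any(keyword in field_lower for keyword in ["name", "first", "last"]):
--             data[field_name] = user_info.get("name", "John Doe")
--         elif "email" in field_lower:
--             data[field_name] = user_info.get("email", "user@example.com")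
--         elif "phone" in field_lower:
--             data[field_name] = user_info.get("phone", "+1234567890")
--         elif any(keyword in field_lower for keyword in ["quantity", "ticket", "count"]):
--             data[field_name] = str(ticket_count)
--         elif "address" in field_lower:
--             data[field_name] = user_info.get("address", "123 Main St")
--         else:
--             data[field_name] = ""
--
--     return data
-- ===== SOURCE B (Python) =====
-- def _fallback_form_data(form_data, user_info, ticket_count):
--     """Generate form data without LLM assistance (layered-overwrite version).
--
--     Start with every field blank, then paint each rule's value over its matching
--     fields, one pass per rule in increasing priority order, so that the
--     highest-priority matching rule's value is written last and survives."""
--     data = {field: "" for field in form_data}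
--     rules = [
--         (("address",), user_info.get("address", "123 Main St")),
--         (("quantity", "ticket", "count"), str(ticket_count)),
--         (("phone",), user_info.get("phone", "+1234567890")),
--         (("email",), user_info.get("email", "user@example.com")),
--         (("name", "first", "last"), user_info.get("name", "John Doe")),
--     ]
--     for keywords, value in rules:
--         for field in data:
--             if any(k in field.lower() for k in keywords):
--                 data[field] = value
--     return data
-- ===== Notes on version B (the rewrite author's own statement) =====
-- stated objective: alternative
-- what changed: B inverts the loop structure: instead of resolving each field by a first-match if-elif chain over the rules, it initializes every field to '' and then makes one overwrite pass over the fields per rule, rules applied in increasing priority order so the highest-priority matching rule's value is written last and survives.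
import Mathlib
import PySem

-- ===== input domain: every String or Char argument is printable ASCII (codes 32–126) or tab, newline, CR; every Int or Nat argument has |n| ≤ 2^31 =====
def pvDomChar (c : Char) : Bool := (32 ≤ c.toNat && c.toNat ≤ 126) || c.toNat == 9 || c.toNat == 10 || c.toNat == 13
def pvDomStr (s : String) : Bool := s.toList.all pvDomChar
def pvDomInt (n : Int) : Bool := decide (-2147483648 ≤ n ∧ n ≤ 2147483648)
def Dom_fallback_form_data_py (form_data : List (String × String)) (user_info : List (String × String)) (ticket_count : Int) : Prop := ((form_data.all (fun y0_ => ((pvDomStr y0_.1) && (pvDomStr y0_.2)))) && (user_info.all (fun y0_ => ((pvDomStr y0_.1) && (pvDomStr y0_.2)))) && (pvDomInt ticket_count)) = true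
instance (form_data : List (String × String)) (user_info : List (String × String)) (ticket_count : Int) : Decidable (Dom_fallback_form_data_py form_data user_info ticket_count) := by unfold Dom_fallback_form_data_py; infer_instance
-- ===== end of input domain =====

-- B inverts A's loop structure: instead of a per-field first-match if-elif chain it blanks all
-- fields and then overwrites matching fields one pass per rule, low priority first (alternative).

-- ===== PORT A =====
-- literal transliteration of A's per-field if-elif chain, building the dict by insertion
def fallback_form_data_py (form_data : List (String × String)) (user_info : List (String × String)) (ticket_count : Int) : List (String × String) :=
  let ui : PySem.Dict String String := ⟨user_info⟩
  (form_data.foldl (fun data kv =>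
    let field_lower := PySem.Str.lower kv.1
    if ["name", "first", "last"].any (fun k => PySem.Str.isIn k field_lower) then
      data.insert kv.1 (ui.getD "name" "John Doe")
    else if PySem.Str.isIn "email" field_lower then
      data.insert kv.1 (ui.getD "email" "user@example.com")
    else if PySem.Str.isIn "phone" field_lower then
      data.insert kv.1 (ui.getD "phone" "+1234567890")
    else if ["quantity", "ticket", "count"].any (fun k => PySem.Str.isIn k field_lower) then
      data.insert kv.1 (PySem.Int.toStr ticket_count)
    else if PySem.Str.isIn "address" field_lower then
      data.insert kv.1 (ui.getD "address" "123 Main St")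
    else
      data.insert kv.1 "") (PySem.Dict.empty)).items

-- ===== PORT B =====
-- B: dict of all fields → "", then one overwrite pass per rule, low-priority rules first
def fallback_form_data_py_alt (form_data : List (String × String)) (user_info : List (String × String)) (ticket_count : Int) : List (String × String) :=
  let ui : PySem.Dict String String := ⟨user_info⟩
  let data0 : PySem.Dict String String :=
    form_data.foldl (fun d kv => d.insert kv.1 "") PySem.Dict.empty
  let rules : List (List String × String) :=
    [ (["address"], ui.getD "address" "123 Main St"),
      (["quantity", "ticket", "count"], PySem.Int.toStr ticket_count),
      (["phone"], ui.getD "phone" "+1234567890"),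
      (["email"], ui.getD "email" "user@example.com"),
      (["name", "first", "last"], ui.getD "name" "John Doe") ]
  (rules.foldl (fun d rule =>
      d.keys.foldl (fun d' field =>
        if rule.1.any (fun k => PySem.Str.isIn k (PySem.Str.lower field)) then
          d'.insert field rule.2
        else d') d) data0).items

-- ===== PRECONDITION & SPEC =====
def Spec_fallback_form_data_py (form_data : List (String × String)) (user_info : List (String × String)) (ticket_count : Int) (out : List (String × String)) : Prop := out = fallback_form_data_py_alt form_data user_info ticket_count
instance (form_data : List (String × String)) (user_info : List (String × String)) (ticket_count : Int) (out : List (String × String)) : Decidable (Spec_fallback_form_data_py form_data user_info ticket_count out) := by unfold Spec_fallback_form_data_py; infer_instance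

-- ===== CLAIM =====
def Claim_equal_fallback_form_data_py : Prop := ∀ (form_data : List (String × String)) (user_info : List (String × String)) (ticket_count : Int), Dom_fallback_form_data_py form_data user_info ticket_count → Spec_fallback_form_data_py form_data user_info ticket_count (fallback_form_data_py form_data user_info ticket_count)

-- ===== LEMMAS AND PROOFS =====

-- a dict whose entries are (k, w k) over a key list
def pvMk (ks : List String) (w : String → String) : PySem.Dict String String :=
  ⟨ks.map (fun k => (k, w k))⟩

def pvPush (ks : List String) (k : String) : List String :=
  if k ∈ ks then ks else ks ++ [k]

-- A's chain as a value function of the field name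
def pvValA (user_info : List (String × String)) (ticket_count : Int) (field : String) : String :=
  let ui : PySem.Dict String String := ⟨user_info⟩
  let field_lower := PySem.Str.lower field
  if ["name", "first", "last"].any (fun k => PySem.Str.isIn k field_lower) then
    ui.getD "name" "John Doe"
  else if PySem.Str.isIn "email" field_lower then
    ui.getD "email" "user@example.com"
  else if PySem.Str.isIn "phone" field_lower then
    ui.getD "phone" "+1234567890"
  else if ["quantity", "ticket", "count"].any (fun k => PySem.Str.isIn k field_lower) then
    PySem.Int.toStr ticket_count
  else if PySem.Str.isIn "address" field_lower then
    ui.getD "address" "123 Main St"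
  else ""

theorem pvMk_congr (ks : List String) (w w' : String → String)
    (h : ∀ x ∈ ks, w x = w' x) : pvMk ks w = pvMk ks w' := by
  unfold pvMk
  congr 1
  exact List.map_congr_left (fun x hx => by rw [h x hx])

theorem pvMk_keys (ks : List String) (w : String → String) : (pvMk ks w).keys = ks := by
  simp [pvMk, PySem.Dict.keys, Function.comp_def]

theorem pvMk_contains (ks : List String) (w : String → String) (k : String) :
    (pvMk ks w).contains k = decide (k ∈ ks) := by
  rw [PySem.Dict.contains_eq_decide_mem_keys, pvMk_keys]

theorem pvInsert_mk_mem (ks : List String) (w : String → String) (k : String) (v : String)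
    (h : k ∈ ks) :
    (pvMk ks w).insert k v = pvMk ks (fun x => if x = k then v else w x) := by
  apply PySem.Dict.ext
  rw [PySem.Dict.items_insert, pvMk_contains]
  simp only [h, decide_true, if_true]
  show (List.map _ _).map _ = _
  rw [List.map_map]
  unfold pvMk
  simp only
  apply List.map_congr_left
  intro x _
  by_cases hx : x = k
  · subst hx; simp
  · simp [hx]

theorem pvInsert_mk_val (ks : List String) (w : String → String) (k : String) :
    (pvMk ks w).insert k (w k) = pvMk (pvPush ks k) w := by
  by_cases h : k ∈ ks
  · rw [pvInsert_mk_mem ks w k (w k) h]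
    unfold pvPush
    rw [if_pos h]
    apply pvMk_congr
    intro x _
    by_cases hx : x = k
    · subst hx; simp
    · simp [hx]
  · apply PySem.Dict.ext
    rw [PySem.Dict.items_insert, pvMk_contains]
    simp only [h, decide_false]
    unfold pvMk pvPush
    rw [if_neg h]
    simp

-- A's value-per-key fold, characterized: keys accumulate, values come from the key function
theorem pvFoldl_insert_val (L : List (String × String)) (f : String → String) :
    ∀ ks : List String,
    L.foldl (fun d kv => d.insert kv.1 (f kv.1)) (pvMk ks f)
      = pvMk (L.foldl (fun ks kv => pvPush ks kv.1) ks) f := by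
  induction L with
  | nil => intro ks; rfl
  | cons kv t ih =>
      intro ks
      simp only [List.foldl_cons]
      rw [pvInsert_mk_val, ih]

theorem pvFoldA (L : List (String × String)) (f : String → String) :
    L.foldl (fun d kv => d.insert kv.1 (f kv.1)) (PySem.Dict.empty : PySem.Dict String String)
      = pvMk (L.foldl (fun ks kv => pvPush ks kv.1) []) f := by
  rw [show (PySem.Dict.empty : PySem.Dict String String) = pvMk [] f from rfl, pvFoldl_insert_val]

-- one overwrite pass with a constant value over keys contained in ks
theorem pvPass (c : String → Bool) (v : String) (ks : List String) :
    ∀ (iter : List String) (w : String → String), (∀ x ∈ iter, x ∈ ks) →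
    iter.foldl (fun d x => if c x then d.insert x v else d) (pvMk ks w)
      = pvMk ks (fun x => if x ∈ iter ∧ c x = true then v else w x) := by
  intro iter
  induction iter with
  | nil =>
      intro w _
      apply pvMk_congr; intro x _; simp
  | cons a t ih =>
      intro w hsub
      simp only [List.foldl_cons]
      by_cases hc : c a = true
      · rw [if_pos hc, pvInsert_mk_mem ks w a v (hsub a (by simp)),
          ih _ (fun x hx => hsub x (by simp [hx]))]
        apply pvMk_congr
        intro x _
        by_cases ht : x ∈ t ∧ c x = true
        · simp [ht]
        · rw [if_neg ht]
          by_cases hx : x = a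
          · subst hx; simp [hc]
          · simp only [hx, if_false]
            rw [if_neg]
            intro hcontra
            rcases hcontra with ⟨hm, hcx⟩
            rcases List.mem_cons.mp hm with h1 | h2
            · exact hx h1
            · exact ht ⟨h2, hcx⟩
      · rw [if_neg hc, ih _ (fun x hx => hsub x (by simp [hx]))]
        apply pvMk_congr
        intro x _
        by_cases ht : x ∈ t ∧ c x = true
        · simp [ht]
        · rw [if_neg ht, if_neg]
          intro hcontra
          rcases hcontra with ⟨hm, hcx⟩
          rcases List.mem_cons.mp hm with h1 | h2
          · subst h1; exact hc hcx
          · exact ht ⟨h2, hcx⟩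

-- ===== VERDICT =====
theorem fallback_form_data_py_spec : Claim_equal_fallback_form_data_py := by
  intro form_data user_info ticket_count _
  unfold Spec_fallback_form_data_py
  unfold fallback_form_data_py fallback_form_data_py_alt
  simp only
  -- rewrite A's fold step as insert of pvValA
  have hA : (fun (data : PySem.Dict String String) (kv : String × String) =>
      let field_lower := PySem.Str.lower kv.1
      if ["name", "first", "last"].any (fun k => PySem.Str.isIn k field_lower) then
        data.insert kv.1 ((⟨user_info⟩ : PySem.Dict String String).getD "name" "John Doe")
      else if PySem.Str.isIn "email" field_lower then
        data.insert kv.1 ((⟨user_info⟩ : PySem.Dict String String).getD "email" "user@example.com")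
      else if PySem.Str.isIn "phone" field_lower then
        data.insert kv.1 ((⟨user_info⟩ : PySem.Dict String String).getD "phone" "+1234567890")
      else if ["quantity", "ticket", "count"].any (fun k => PySem.Str.isIn k field_lower) then
        data.insert kv.1 (PySem.Int.toStr ticket_count)
      else if PySem.Str.isIn "address" field_lower then
        data.insert kv.1 ((⟨user_info⟩ : PySem.Dict String String).getD "address" "123 Main St")
      else data.insert kv.1 "")
      = (fun data kv => data.insert kv.1 (pvValA user_info ticket_count kv.1)) := by
    funext data kv
    unfold pvValA
    simp only
    split_ifs <;> rfl
  rw [hA]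
  have hB : (fun (d : PySem.Dict String String) (kv : String × String) => d.insert kv.1 "")
      = (fun d kv => d.insert kv.1 ((fun _ => "") kv.1)) := rfl
  rw [pvFoldA form_data (pvValA user_info ticket_count), hB, pvFoldA form_data (fun _ => "")]
  simp only [List.foldl_cons, List.foldl_nil]
  rw [pvMk_keys, pvPass _ _ _ _ _ (fun x hx => hx)]
  rw [pvMk_keys, pvPass _ _ _ _ _ (fun x hx => hx)]
  rw [pvMk_keys, pvPass _ _ _ _ _ (fun x hx => hx)]
  rw [pvMk_keys, pvPass _ _ _ _ _ (fun x hx => hx)]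
  rw [pvMk_keys, pvPass _ _ _ _ _ (fun x hx => hx)]
  congr 1
  apply pvMk_congr
  intro x hx
  unfold pvValA
  simp only [hx, true_and, List.any_cons, List.any_nil, Bool.or_false]
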